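-- pv_equiv track=rewrite | github.com/jasonchao1122/GEP_ARR_Chatbot | Automated-Daily-Report/partner_pods.py | group_partners_by_pod
-- ===== SOURCE A (Python) =====
-- PARTNER_DATA = {
--     # Accounting
--     'BQE Software, Inc': ('Accounting', 'P1'),
--     'Collective': ('Accounting', 'Anchor'),
--     'CustomBooks Gusto Integration': ('Accounting', 'P2'),
--     'Formations': ('Accounting', 'P2'),
--     'Freshbooks': ('Accounting', 'Anchor'),
--     'Heard': ('Accounting', 'P2'),
--     'Lettuce Financial Labs': ('Accounting', 'P2'),
--     'Xero Payroll': ('Accounting', 'Anchor'),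
--
--     # Banking
--     'Chase': ('Banking', 'Anchor'),
--     'Citizens': ('Banking', 'P1'),
--     'US Bancorp': ('Banking', 'Anchor'),
--
--     # HRIS
--     'HR for Health': ('HRIS', 'P1'),
--     'HiBob Payroll': ('HRIS', 'Anchor'),
--     'Lattice Payroll': ('HRIS', 'Anchor'),
--     'Remote.com - Production Oct/2023': ('HRIS', 'P2'),
--     'guHRoo': ('HRIS', 'P2'),
--
--     # VSaaS (Vertical SaaS)
--     'Archy - Deprecated': ('VSaaS', 'P2'),
--     'CleanCloud': ('VSaaS', 'P2'),
--     'Dolce': ('VSaaS', 'P2'),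
--     'GoCo': ('VSaaS', 'P1'),
--     'Groundcloud Prod 2': ('VSaaS', 'P2'),
--     'RockSpoon, Inc': ('VSaaS', 'P2'),
--     'Studio Designer': ('VSaaS', 'P1'),
--     'Thryv, Inc.': ('VSaaS', 'P1'),
--     'Vagaro Embedded Payroll': ('VSaaS', 'Anchor'),
--     'busybusy': ('VSaaS', 'P2'),
--
--     # Partners not in FY26 sheet - default to Other
--     'Hour Timesheet LLC. Prod 2': ('Other', 'P2'),
--     'Hourly.io': ('Other', 'P2'),
--     'Goldfish [EMB TEST]': ('Other', 'P2'),
-- }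
--
-- POD_ORDER = [
--     'Accounting',
--     'Banking',
--     'HRIS',
--     'VSaaS',
--     'Other',
-- ]
--
-- def get_partner_pod(partner_name):
--     """Get the pod/category for a partner name"""
--     data = PARTNER_DATA.get(partner_name, ('Other', 'P2'))
--     return data[0]
--
-- def group_partners_by_pod(partner_list):
--     """
--     Group a list of partners by pod
--
--     Args:
--         partner_list: List of partner dictionaries with 'name' key
--
--     Returns:
--         Dictionary with pod names as keys, list of partners as values
--     """
--     pods = {pod: [] for pod in POD_ORDER}
--
--     for partner in partner_list:
--         pod = get_partner_pod(partner.get('name', ''))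
--         if pod not in pods:
--             pods[pod] = []
--         pods[pod].append(partner)
--
--     # Remove empty pods
--     return {pod: partners for pod, partners in pods.items() if partners}
-- ===== SOURCE B (Python) =====
-- # Pod membership stored the other way round: names grouped per pod, 'Other' implicit.
-- POD_MEMBERS = {
--     'Accounting': ['BQE Software, Inc', 'Collective', 'CustomBooks Gusto Integration',
--                    'Formations', 'Freshbooks', 'Heard', 'Lettuce Financial Labs', 'Xero Payroll'],
--     'Banking': ['Chase', 'Citizens', 'US Bancorp'],
--     'HRIS': ['HR for Health', 'HiBob Payroll', 'Lattice Payroll',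
--              'Remote.com - Production Oct/2023', 'guHRoo'],
--     'VSaaS': ['Archy - Deprecated', 'CleanCloud', 'Dolce', 'GoCo', 'Groundcloud Prod 2',
--               'RockSpoon, Inc', 'Studio Designer', 'Thryv, Inc.', 'Vagaro Embedded Payroll',
--               'busybusy'],
-- }
--
-- POD_ORDER = ['Accounting', 'Banking', 'HRIS', 'VSaaS', 'Other']
--
-- def _pod_of(name):
--     for pod, members in POD_MEMBERS.items():
--         if name in members:
--             return pod
--     return 'Other'
--
-- def group_partners_by_pod(partner_list):
--     # Outer loop over POD_ORDER, selecting each pod's partners from the list.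
--     result = {}
--     for pod in POD_ORDER:
--         bucket = [p for p in partner_list if _pod_of(p.get('name', '')) == pod]
--         if bucket:
--             result[pod] = bucket
--     return result
-- ===== Notes on version B (the rewrite author's own statement) =====
-- stated objective: alternative
-- what changed: Inverts the data layout (names grouped per pod instead of a name->pod dict, with 'Other' implicit as the fallback) and inverts the loop: instead of one pass appending each partner into a pre-seeded mutable dict, B loops over POD_ORDER and selects each pod's partners from the list, appending only non-empty buckets.
import Mathlib
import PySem

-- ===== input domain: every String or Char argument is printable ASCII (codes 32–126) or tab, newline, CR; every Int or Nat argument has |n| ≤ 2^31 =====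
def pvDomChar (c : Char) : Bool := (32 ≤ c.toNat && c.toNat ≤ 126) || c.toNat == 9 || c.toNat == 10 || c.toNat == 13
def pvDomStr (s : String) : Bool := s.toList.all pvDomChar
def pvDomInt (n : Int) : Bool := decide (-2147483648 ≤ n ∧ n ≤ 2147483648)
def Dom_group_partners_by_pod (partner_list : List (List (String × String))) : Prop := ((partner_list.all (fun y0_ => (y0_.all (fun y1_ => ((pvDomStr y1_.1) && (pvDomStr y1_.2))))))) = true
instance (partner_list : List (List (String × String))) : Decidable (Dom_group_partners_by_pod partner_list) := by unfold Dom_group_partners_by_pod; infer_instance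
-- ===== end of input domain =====

-- B inverts the data layout (names grouped per pod, 'Other' implicit) and the loop
-- (outer loop over POD_ORDER selecting each pod's partners) (objective: alternative).


-- ===== PORT A =====
def PARTNER_DATA : PySem.Dict String (String × String) := PySem.Dict.ofList [
  ("BQE Software, Inc", ("Accounting", "P1")),
  ("Collective", ("Accounting", "Anchor")),
  ("CustomBooks Gusto Integration", ("Accounting", "P2")),
  ("Formations", ("Accounting", "P2")),
  ("Freshbooks", ("Accounting", "Anchor")),
  ("Heard", ("Accounting", "P2")),
  ("Lettuce Financial Labs", ("Accounting", "P2")),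
  ("Xero Payroll", ("Accounting", "Anchor")),
  ("Chase", ("Banking", "Anchor")),
  ("Citizens", ("Banking", "P1")),
  ("US Bancorp", ("Banking", "Anchor")),
  ("HR for Health", ("HRIS", "P1")),
  ("HiBob Payroll", ("HRIS", "Anchor")),
  ("Lattice Payroll", ("HRIS", "Anchor")),
  ("Remote.com - Production Oct/2023", ("HRIS", "P2")),
  ("guHRoo", ("HRIS", "P2")),
  ("Archy - Deprecated", ("VSaaS", "P2")),
  ("CleanCloud", ("VSaaS", "P2")),
  ("Dolce", ("VSaaS", "P2")),
  ("GoCo", ("VSaaS", "P1")),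
  ("Groundcloud Prod 2", ("VSaaS", "P2")),
  ("RockSpoon, Inc", ("VSaaS", "P2")),
  ("Studio Designer", ("VSaaS", "P1")),
  ("Thryv, Inc.", ("VSaaS", "P1")),
  ("Vagaro Embedded Payroll", ("VSaaS", "Anchor")),
  ("busybusy", ("VSaaS", "P2")),
  ("Hour Timesheet LLC. Prod 2", ("Other", "P2")),
  ("Hourly.io", ("Other", "P2")),
  ("Goldfish [EMB TEST]", ("Other", "P2"))]

def POD_ORDER : List String := ["Accounting", "Banking", "HRIS", "VSaaS", "Other"]

def get_partner_pod (partner_name : String) : String :=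
  (PARTNER_DATA.getD partner_name ("Other", "P2")).1

def group_partners_by_pod (partner_list : List (List (String × String))) : List (String × List (List (String × String))) :=
  let pods : PySem.Dict String (List (List (String × String))) :=
    POD_ORDER.foldl (fun d pod => d.insert pod []) PySem.Dict.empty
  let pods := partner_list.foldl (fun d partner =>
      let pod := get_partner_pod ((PySem.Dict.mk partner).getD "name" "")
      let d := if d.contains pod then d else d.insert pod []
      d.modify pod [] (fun l => l ++ [partner])) pods
  pods.items.filter (fun q => !q.2.isEmpty)

-- ===== PORT B =====
def POD_MEMBERS : List (String × List String) := [
  ("Accounting", ["BQE Software, Inc", "Collective", "CustomBooks Gusto Integration",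
                  "Formations", "Freshbooks", "Heard", "Lettuce Financial Labs", "Xero Payroll"]),
  ("Banking", ["Chase", "Citizens", "US Bancorp"]),
  ("HRIS", ["HR for Health", "HiBob Payroll", "Lattice Payroll",
            "Remote.com - Production Oct/2023", "guHRoo"]),
  ("VSaaS", ["Archy - Deprecated", "CleanCloud", "Dolce", "GoCo", "Groundcloud Prod 2",
             "RockSpoon, Inc", "Studio Designer", "Thryv, Inc.", "Vagaro Embedded Payroll",
             "busybusy"])]

-- 'for pod, members in POD_MEMBERS.items(): if name in members: return pod' = first match
def pod_of (name : String) : String :=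
  match POD_MEMBERS.find? (fun q => q.2.contains name) with
  | some q => q.1
  | none => "Other"

def group_partners_by_pod_alt (partner_list : List (List (String × String))) : List (String × List (List (String × String))) :=
  POD_ORDER.foldl (fun result pod =>
      let bucket := partner_list.filter (fun p => pod_of ((PySem.Dict.mk p).getD "name" "") == pod)
      if !bucket.isEmpty then result ++ [(pod, bucket)] else result) []

-- ===== PRECONDITION & SPEC =====
def Spec_group_partners_by_pod (partner_list : List (List (String × String))) (out : List (String × List (List (String × String)))) : Prop := out = group_partners_by_pod_alt partner_list
instance (partner_list : List (List (String × String))) (out : List (String × List (List (String × String)))) : Decidable (Spec_group_partners_by_pod partner_list out) := by unfold Spec_group_partners_by_pod; infer_instance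

-- ===== CLAIM (what is proved, stated in full; the proofs are below) =====
def Claim_equal_group_partners_by_pod : Prop := ∀ (partner_list : List (List (String × String))), Dom_group_partners_by_pod partner_list → Spec_group_partners_by_pod partner_list (group_partners_by_pod partner_list)

-- ===== LEMMAS AND PROOFS =====

-- the pod of a partner row, as A computes it
def podOf (p : List (String × String)) : String :=
  get_partner_pod ((PySem.Dict.mk p).getD "name" "")

-- A's initial dict {pod: [] for pod in POD_ORDER}
def pods0 : PySem.Dict String (List (List (String × String))) :=
  POD_ORDER.foldl (fun d pod => d.insert pod []) PySem.Dict.empty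

-- B's membership table agrees with A's name->pod dict on every string
set_option maxRecDepth 8192 in
theorem pod_of_eq (name : String) : pod_of name = get_partner_pod name := by
  unfold pod_of
  cases hf : POD_MEMBERS.find? (fun q => q.2.contains name) with
  | none =>
    unfold get_partner_pod
    rw [PySem.Dict.getD_eq_get?_getD]
    cases h : PARTNER_DATA.get? name with
    | none => rfl
    | some v =>
      have hv : (name, v) ∈ PARTNER_DATA.items := PySem.Dict.mem_items_of_get?_eq_some _ h
      have hall : ∀ p ∈ PARTNER_DATA.items, p.2.1 = "Other" ∨ ∃ q ∈ POD_MEMBERS, p.1 ∈ q.2 := by decide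
      rcases hall _ hv with ho | ⟨q, hqm, hnm⟩
      · simpa using ho.symm
      · exfalso
        have hnone := List.find?_eq_none.mp hf q hqm
        simp at hnone
        exact hnone hnm
  | some q =>
    have hqm : q ∈ POD_MEMBERS := List.mem_of_find?_eq_some hf
    have hp : q.2.contains name := List.find?_eq_some_iff_append.mp hf |>.1
    have hmem : name ∈ q.2 := by simpa using hp
    have hall : ∀ q' ∈ POD_MEMBERS, ∀ n ∈ q'.2, get_partner_pod n = q'.1 := by decide
    simpa using (hall q hqm name hmem).symm

theorem get_partner_pod_mem (name : String) : get_partner_pod name ∈ POD_ORDER := by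
  unfold get_partner_pod
  rw [PySem.Dict.getD_eq_get?_getD]
  cases h : PARTNER_DATA.get? name with
  | none => simp [POD_ORDER]
  | some v =>
    have hv : (name, v) ∈ PARTNER_DATA.items := PySem.Dict.mem_items_of_get?_eq_some _ h
    have : ∀ q ∈ PARTNER_DATA.items, q.2.1 ∈ POD_ORDER := by decide
    simpa using this _ hv

theorem pods0_keys : pods0.keys = POD_ORDER := by decide

theorem pods0_getD (k : String) : pods0.getD k [] = [] := by
  show (PySem.Dict.mk [("Accounting", []), ("Banking", []), ("HRIS", []), ("VSaaS", []), ("Other", [])]).getD k [] = []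
  simp only [PySem.Dict.getD_eq_get?_getD, PySem.Dict.get?_mk_cons]
  split_ifs <;> rfl

theorem set_update_of_subset {l s : List String} (h : ∀ x ∈ l, x ∈ s) :
    PySem.Set.update s l = s := by
  induction l generalizing s with
  | nil => rfl
  | cons x xs ih =>
    have hx : PySem.Set.add s x = s := by
      simp [PySem.Set.add, PySem.Set.contains, h x (by simp)]
    simp only [PySem.Set.update, List.foldl_cons]
    rw [show List.foldl PySem.Set.add (PySem.Set.add s x) xs = PySem.Set.update (PySem.Set.add s x) xs from rfl,
      hx]
    exact ih fun y hy => h y (by simp [hy])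

-- the A-loop with the dead 'if' removed
theorem foldA_eq_foldM (pl : List (List (String × String)))
    (d : PySem.Dict String (List (List (String × String))))
    (hd : ∀ s ∈ POD_ORDER, d.contains s = true) :
    pl.foldl (fun d partner =>
      let pod := get_partner_pod ((PySem.Dict.mk partner).getD "name" "")
      let d := if d.contains pod then d else d.insert pod []
      d.modify pod [] (fun l => l ++ [partner])) d
    = pl.foldl (fun d p => d.modify (podOf p) [] (fun l => l ++ [p])) d := by
  induction pl generalizing d with
  | nil => rfl
  | cons p rest ih =>
    simp only [List.foldl_cons]
    rw [show (if d.contains (get_partner_pod ((PySem.Dict.mk p).getD "name" "")) then d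
        else d.insert (get_partner_pod ((PySem.Dict.mk p).getD "name" "")) []) = d from by
      rw [hd _ (get_partner_pod_mem _)]; rfl]
    exact ih _ fun s hs => by
      rw [PySem.Dict.contains_modify]
      simp [hd s hs]

-- ===== VERDICT (by name: the statement is the Claim_ definition above) =====
set_option maxRecDepth 4096 in
theorem group_partners_by_pod_spec : Claim_equal_group_partners_by_pod := by
  intro pl _
  unfold Spec_group_partners_by_pod group_partners_by_pod group_partners_by_pod_alt
  simp only []
  have hd0 : ∀ s ∈ POD_ORDER, pods0.contains s = true := by decide
  rw [show (POD_ORDER.foldl (fun d pod => d.insert pod []) PySem.Dict.empty :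
      PySem.Dict String (List (List (String × String)))) = pods0 from rfl]
  rw [foldA_eq_foldM pl pods0 hd0]
  have hmap : pl.foldl (fun d p => d.modify (podOf p) [] (fun l => l ++ [p])) pods0
      = (pl.map (fun p => (podOf p, p))).foldl (fun d q => d.modify q.1 [] (fun l => l ++ [q.2])) pods0 := by
    rw [List.foldl_map]
  set final := pl.foldl (fun d p => d.modify (podOf p) [] (fun l => l ++ [p])) pods0 with hfinal
  have hkeys : final.keys = POD_ORDER := by
    rw [hfinal, PySem.Dict.keys_foldl_modify_key, pods0_keys]
    refine set_update_of_subset ?_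
    intro x hx
    simp only [List.mem_map] at hx
    obtain ⟨p, -, rfl⟩ := hx
    exact get_partner_pod_mem _
  have hnd : final.keys.Nodup := by rw [hkeys]; decide
  have hget : ∀ k, final.getD k [] = pl.filter (fun p => podOf p == k) := by
    intro k
    rw [hmap, PySem.Dict.getD_foldl_modify_append, pods0_getD]
    rw [List.filter_map]
    simp [Function.comp_def]
  have hitems : final.items = POD_ORDER.map (fun k => (k, pl.filter (fun p => podOf p == k))) := by
    rw [PySem.Dict.items_eq_map_keys final hnd [], hkeys]
    exact List.map_congr_left fun k _ => by rw [hget]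
  rw [hitems]
  -- B side: fold with conditional append = filter of map
  rw [PySem.List.foldl_append_if
    (p := fun pod => !(pl.filter (fun x => pod_of ((PySem.Dict.mk x).getD "name" "") == pod)).isEmpty)
    (f := fun pod => (pod, pl.filter (fun x => pod_of ((PySem.Dict.mk x).getD "name" "") == pod)))]
  rw [List.filter_map]
  simp only [List.nil_append, Function.comp_def, pod_of_eq, podOf]
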